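-- pv_equiv track=rewrite | github.com/dmesgana/wendysdrivethru | Theorem Prover/prover.py | lastOp
-- ===== SOURCE A (Python) =====
-- def lastOp(expr):
--     count = 0
--     for i in range(len(expr)):
--         if count == 0:
--             if expr[i] == "|":
--                 return expr[i], i
--         if expr[i] == ")":
--             count -= 1
--         if expr[i] == "(":
--             count += 1
--     count = 0
--     for i in range(len(expr)):
--         if count == 0:
--             if expr[i] == "&":
--                 return expr[i], i
--         if expr[i] == ")":
--             count -= 1
--         if expr[i] == "(":
--             count += 1
--     count = 0
--     for i in range(len(expr)):
--         if count == 0: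
--             if expr[i] == "!":
--                 return expr[i], i
--         if expr[i] == ")":
--             count -= 1
--         if expr[i] == "(":
--             count += 1
--     return None, None
-- ===== SOURCE B (Python) =====
-- def lastOp(expr):
--     count = 0
--     pipe = amp = bang = None
--     for i, c in enumerate(expr):
--         if count == 0:
--             if c == "|" and pipe is None:
--                 pipe = i
--             if c == "&" and amp is None:
--                 amp = i
--             if c == "!" and bang is None:
--                 bang = i
--         if c == ")":
--             count -= 1
--         if c == "(":
--             count += 1
--     if pipe is not None:
--         return "|", pipe
--     if amp is not None:
--         return "&", amp
--     if bang is not None: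
--         return "!", bang
--     return None, None
-- ===== Notes on version B (the rewrite author's own statement) =====
-- stated objective: faster
-- what changed: Replaces A's three full depth-tracking scans (one per operator) by a single pass that records the first top-level index of each of '|', '&', '!' and selects by precedence afterwards.
import Mathlib
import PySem

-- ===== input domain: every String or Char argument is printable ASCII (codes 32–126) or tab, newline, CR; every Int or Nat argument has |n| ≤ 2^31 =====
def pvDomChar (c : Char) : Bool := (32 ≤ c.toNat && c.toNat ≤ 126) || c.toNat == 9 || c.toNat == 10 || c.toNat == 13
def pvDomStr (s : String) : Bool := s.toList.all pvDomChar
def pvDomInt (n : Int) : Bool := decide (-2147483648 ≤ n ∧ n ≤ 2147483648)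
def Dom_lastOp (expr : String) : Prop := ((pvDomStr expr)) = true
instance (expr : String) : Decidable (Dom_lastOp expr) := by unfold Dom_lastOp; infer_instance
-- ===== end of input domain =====

-- B replaces A's three whole-string scans (one per operator) by one pass recording the
-- first top-level index of each operator, selecting by precedence at the end (constant-factor speedup).

-- ===== PORT A =====
-- one of A's three identical loops, parameterised by the operator it looks for
def lastOpScan (op : Char) : List Char → Int → Int → Option Int
  | [], _, _ => none
  | c :: rest, i, count =>
    if count = 0 ∧ c = op then some i
    else lastOpScan op rest (i + 1)
          (count + (if c = ')' then (-1 : Int) else 0) + (if c = '(' then 1 else 0))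

def lastOp (expr : String) : Option String × Option Int :=
  match lastOpScan '|' expr.toList 0 0 with
  | some i => (some "|", some i)
  | none =>
    match lastOpScan '&' expr.toList 0 0 with
    | some i => (some "&", some i)
    | none =>
      match lastOpScan '!' expr.toList 0 0 with
      | some i => (some "!", some i)
      | none => (none, none)

-- ===== PORT B =====
-- single pass: state = (first top-level '|', first '&', first '!')
def lastOpScanB : List Char → Int → Int → Option Int → Option Int → Option Int →
    Option Int × Option Int × Option Int
  | [], _, _, p, a, b => (p, a, b)
  | c :: rest, i, count, p, a, b =>
    let p' := if count = 0 ∧ c = '|' ∧ p = none then some i else p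
    let a' := if count = 0 ∧ c = '&' ∧ a = none then some i else a
    let b' := if count = 0 ∧ c = '!' ∧ b = none then some i else b
    lastOpScanB rest (i + 1)
      (count + (if c = ')' then (-1 : Int) else 0) + (if c = '(' then 1 else 0)) p' a' b'

def lastOp_alt (expr : String) : Option String × Option Int :=
  match lastOpScanB expr.toList 0 0 none none none with
  | (some i, _, _) => (some "|", some i)
  | (none, some i, _) => (some "&", some i)
  | (none, none, some i) => (some "!", some i)
  | (none, none, none) => (none, none)

-- ===== PRECONDITION & SPEC =====
def Spec_lastOp (expr : String) (out : Option String × Option Int) : Prop := out = lastOp_alt expr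
instance (expr : String) (out : Option String × Option Int) : Decidable (Spec_lastOp expr out) := by unfold Spec_lastOp; infer_instance

-- ===== CLAIM (what is proved, stated in full; the proofs are below) =====
def Claim_equal_lastOp : Prop := ∀ (expr : String), Dom_lastOp expr → Spec_lastOp expr (lastOp expr)

-- ===== LEMMAS AND PROOFS =====

-- the single pass computes, for each operator, the leftover state orElse'd with A's scan result
theorem lastOpScanB_eq (l : List Char) : ∀ (i count : Int) (p a b : Option Int),
    lastOpScanB l i count p a b =
      (p.orElse (fun _ => lastOpScan '|' l i count),
       a.orElse (fun _ => lastOpScan '&' l i count),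
       b.orElse (fun _ => lastOpScan '!' l i count)) := by
  induction l with
  | nil => intro i count p a b; simp [lastOpScanB, lastOpScan]
  | cons c rest ih =>
    intro i count p a b
    simp only [lastOpScanB, lastOpScan, ih]
    congr 1
    · by_cases h : count = 0 ∧ c = '|'
      · simp [h]; cases p <;> simp
      · simp [h]
        have : ¬ (count = 0 ∧ c = '|' ∧ p = none) := by
          rintro ⟨h1, h2, _⟩; exact h ⟨h1, h2⟩
        simp [this]
    congr 1
    · by_cases h : count = 0 ∧ c = '&'
      · simp [h]; cases a <;> simp
      · simp [h]
        have : ¬ (count = 0 ∧ c = '&' ∧ a = none) := by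
          rintro ⟨h1, h2, _⟩; exact h ⟨h1, h2⟩
        simp [this]
    · by_cases h : count = 0 ∧ c = '!'
      · simp [h]; cases b <;> simp
      · simp [h]
        have : ¬ (count = 0 ∧ c = '!' ∧ b = none) := by
          rintro ⟨h1, h2, _⟩; exact h ⟨h1, h2⟩
        simp [this]

-- ===== VERDICT (by name: the statement is the Claim_ definition above) =====
theorem lastOp_spec : Claim_equal_lastOp := by
  intro expr _
  unfold Spec_lastOp lastOp lastOp_alt
  rw [lastOpScanB_eq]
  cases lastOpScan '|' expr.toList 0 0 <;>
  cases lastOpScan '&' expr.toList 0 0 <;>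
  cases lastOpScan '!' expr.toList 0 0 <;> simp
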